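-- pv_equiv track=rewrite | github.com/NiamhOF/python-practicals | practical-18/p18p5-2.py | isXYZ
-- ===== SOURCE A (Python) =====
-- def hasNoPrefix(index, s):
--     '''takes an index and a string and checks for a period'''
--     if index == 0:
--         return True
--     elif s[index - 1] == '.':
--         return False
--     else:
--         return True
--
-- def isXYZ (s):
--     '''takes string and checks if xyz is in it'''
--     containsXYZ = False
--     if len (s) > 2:
--         for i in range (0, len(s) - 2):
--             if s [i] == 'x' and s [i + 1] == 'y' and s[i + 2] == 'z':
--                 if hasNoPrefix(i, s):
--                     containsXYZ = True
--                     break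
--     return containsXYZ
-- ===== SOURCE B (Python) =====
-- def isXYZ(s):
--     '''takes string and checks if xyz is in it'''
--     state = 0   # chars of the pattern matched by the live candidate
--     prev = ''
--     for c in s:
--         if state == 2 and c == 'z':
--             return True
--         if state == 1 and c == 'y':
--             state = 2
--         elif c == 'x' and prev != '.':
--             state = 1
--         else:
--             state = 0
--         prev = c
--     return False
-- ===== Notes on version B (the rewrite author's own statement) =====
-- stated objective: alternative
-- what changed: Replaced the indexed scan comparing a 3-character window at every position (with a helper re-reading the preceding character) by a single left-to-right pass of a pattern-matching state machine that carries how many characters of a live candidate match are already seen, plus the previous character.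
import Mathlib
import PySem

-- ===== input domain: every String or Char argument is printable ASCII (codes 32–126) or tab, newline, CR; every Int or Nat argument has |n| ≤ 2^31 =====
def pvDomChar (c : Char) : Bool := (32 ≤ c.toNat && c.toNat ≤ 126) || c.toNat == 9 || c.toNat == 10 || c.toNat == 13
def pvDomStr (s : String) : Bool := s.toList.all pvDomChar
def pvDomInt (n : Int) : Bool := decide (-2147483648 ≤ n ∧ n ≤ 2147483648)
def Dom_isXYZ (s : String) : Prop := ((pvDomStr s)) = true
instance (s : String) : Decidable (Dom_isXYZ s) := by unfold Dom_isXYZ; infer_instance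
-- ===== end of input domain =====

-- B replaces A's indexed 3-character-window scan by a single pass of a pattern-matching
-- state machine (objective: alternative algorithm, same cost; return value only, no side effects).

-- ===== PORT A =====
-- literal port of hasNoPrefix(index, s)
def hasNoPrefix (index : Int) (cs : List Char) : Bool :=
  if index = 0 then true
  else if PySem.List.pyGetD cs (index - 1) ' ' = '.' then false
  else true

-- the 'for i in range(0, len(s)-2): … break' loop, as structural recursion over the index list
def isXYZLoop (cs : List Char) : List Int → Bool
  | [] => false
  | i :: rest =>
    if PySem.List.pyGetD cs i ' ' = 'x' ∧ PySem.List.pyGetD cs (i + 1) ' ' = 'y' ∧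
        PySem.List.pyGetD cs (i + 2) ' ' = 'z' then
      if hasNoPrefix i cs then true else isXYZLoop cs rest
    else isXYZLoop cs rest

def isXYZ (s : String) : Bool :=
  if (PySem.Str.len s) > 2 then
    isXYZLoop s.toList (PySem.List.pyRange 0 (PySem.Str.len s - 2) 1)
  else false

-- ===== PORT B =====
-- Source B's for-loop: state machine over the characters; prev = '' is modelled as none
def bLoop : List Char → Int → Option Char → Bool
  | [], _, _ => false
  | c :: rest, state, prev =>
    if state = 2 ∧ c = 'z' then true
    else if state = 1 ∧ c = 'y' then bLoop rest 2 (some c)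
    else if c = 'x' ∧ prev ≠ some '.' then bLoop rest 1 (some c)
    else bLoop rest 0 (some c)

def isXYZ_alt (s : String) : Bool := bLoop s.toList 0 none

-- ===== PRECONDITION & SPEC =====
def Spec_isXYZ (s : String) (out : Bool) : Prop := out = isXYZ_alt s
instance (s : String) (out : Bool) : Decidable (Spec_isXYZ s out) := by unfold Spec_isXYZ; infer_instance

-- ===== CLAIM (what is proved, stated in full; the proofs are below) =====
def Claim_equal_isXYZ : Prop := ∀ (s : String), Dom_isXYZ s → Spec_isXYZ s (isXYZ s)

-- ===== LEMMAS AND PROOFS =====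

-- a valid start: position m is not preceded by a period
def VS (L : List Char) (m : Nat) : Prop := m = 0 ∨ L[m - 1]? ≠ some '.'

-- a valid match of 'xyz' at position m
def VM (L : List Char) (m : Nat) : Prop :=
  L[m]? = some 'x' ∧ L[m + 1]? = some 'y' ∧ L[m + 2]? = some 'z' ∧ VS L m

lemma VM_lt {L : List Char} {m : Nat} (h : VM L m) : m + 2 < L.length := by
  have := h.2.2.1
  rw [List.getElem?_eq_some_iff] at this
  exact this.1

-- A's loop returns true iff some listed index passes the window test and the prefix test
lemma loopA_iff (cs : List Char) (l : List Int) :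
    isXYZLoop cs l = true ↔ ∃ i ∈ l,
      (PySem.List.pyGetD cs i ' ' = 'x' ∧ PySem.List.pyGetD cs (i + 1) ' ' = 'y' ∧
        PySem.List.pyGetD cs (i + 2) ' ' = 'z') ∧ hasNoPrefix i cs = true := by
  induction l with
  | nil => simp [isXYZLoop]
  | cons i rest ih =>
    rw [isXYZLoop]
    by_cases ht : PySem.List.pyGetD cs i ' ' = 'x' ∧ PySem.List.pyGetD cs (i + 1) ' ' = 'y' ∧
        PySem.List.pyGetD cs (i + 2) ' ' = 'z'
    · rw [if_pos ht]
      by_cases hp : hasNoPrefix i cs = true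
      · simp only [hp]
        constructor
        · intro _; exact ⟨i, by simp, ht, hp⟩
        · intro _; rfl
      · rw [if_neg hp, ih]
        constructor
        · rintro ⟨j, hj, h⟩; exact ⟨j, by simp [hj], h⟩
        · rintro ⟨j, hj, h⟩
          rcases List.mem_cons.mp hj with rfl | hj'
          · exact absurd h.2 hp
          · exact ⟨j, hj', h⟩
    · rw [if_neg ht, ih]
      constructor
      · rintro ⟨j, hj, h⟩; exact ⟨j, by simp [hj], h⟩
      · rintro ⟨j, hj, h⟩
        rcases List.mem_cons.mp hj with rfl | hj'
        · exact absurd h.1 ht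
        · exact ⟨j, hj', h⟩

-- the window test at a natural index m (m + 2 < length) is the getElem? form
lemma testA_iff (cs : List Char) (m : Nat) (h : m + 2 < cs.length) :
    (PySem.List.pyGetD cs (m : Int) ' ' = 'x' ∧ PySem.List.pyGetD cs ((m : Int) + 1) ' ' = 'y' ∧
      PySem.List.pyGetD cs ((m : Int) + 2) ' ' = 'z')
    ↔ (cs[m]? = some 'x' ∧ cs[m + 1]? = some 'y' ∧ cs[m + 2]? = some 'z') := by
  have e1 : ((m : Int) + 1) = ((m + 1 : Nat) : Int) := by push_cast; ring
  have e2 : ((m : Int) + 2) = ((m + 2 : Nat) : Int) := by push_cast; ring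
  rw [e1, e2, PySem.List.pyGetD_natCast, PySem.List.pyGetD_natCast, PySem.List.pyGetD_natCast,
    List.getD_eq_getElem _ _ (by omega), List.getD_eq_getElem _ _ (by omega),
    List.getD_eq_getElem _ _ (by omega),
    List.getElem?_eq_getElem (by omega), List.getElem?_eq_getElem (by omega),
    List.getElem?_eq_getElem (by omega)]
  simp

-- the prefix test at a natural index m (m < length) is VS
lemma hasNoPrefix_iff (cs : List Char) (m : Nat) (h : m < cs.length) :
    hasNoPrefix (m : Int) cs = true ↔ VS cs m := by
  unfold hasNoPrefix VS
  by_cases h0 : m = 0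
  · subst h0; simp
  · rw [if_neg (by exact_mod_cast h0)]
    have e1 : ((m : Int) - 1) = ((m - 1 : Nat) : Int) := by omega
    rw [e1, PySem.List.pyGetD_natCast, List.getD_eq_getElem _ _ (by omega),
      List.getElem?_eq_getElem (by omega)]
    by_cases hc : cs[m - 1] = '.'
    · simp [hc, h0]
    · simp [hc, h0]

-- A returns true iff some valid match exists
lemma A_iff (s : String) : isXYZ s = true ↔ ∃ m, VM s.toList m := by
  set cs := s.toList with hcs
  have hlen : PySem.Str.len s = (cs.length : Int) := by simp [PySem.Str.len_eq, hcs]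
  unfold isXYZ
  by_cases h : PySem.Str.len s > 2
  · rw [if_pos h, ← hcs, loopA_iff]
    constructor
    · rintro ⟨i, hi, ht, hp⟩
      rw [PySem.List.mem_pyRange_one] at hi
      have h0 : 0 ≤ i := hi.1
      have hieq : i = ((i.toNat : Nat) : Int) := (Int.toNat_of_nonneg h0).symm
      have hib : i.toNat + 2 < cs.length := by omega
      rw [hieq] at ht hp
      exact ⟨i.toNat, (testA_iff cs i.toNat hib).mp ht |>.1,
        ((testA_iff cs i.toNat hib).mp ht).2.1, ((testA_iff cs i.toNat hib).mp ht).2.2,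
        (hasNoPrefix_iff cs i.toNat (by omega)).mp hp⟩
    · rintro ⟨m, hvm⟩
      have hb := VM_lt hvm
      refine ⟨(m : Int), ?_, ?_, ?_⟩
      · rw [PySem.List.mem_pyRange_one]
        constructor
        · exact_mod_cast Nat.zero_le m
        · rw [hlen]; omega
      · exact (testA_iff cs m hb).mpr ⟨hvm.1, hvm.2.1, hvm.2.2.1⟩
      · exact (hasNoPrefix_iff cs m (by omega)).mpr hvm.2.2.2
  · rw [if_neg h]
    simp only [Bool.false_eq_true, false_iff]
    rintro ⟨m, hvm⟩
    have := VM_lt hvm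
    omega

-- B's state-machine loop, with the invariant, accepts iff some valid match exists.
-- k is the number of consumed characters; state records the live candidate.
lemma bLoop_iff (L : List Char) (cs : List Char) : ∀ (k : Nat) (state : Int) (prev : Option Char),
    L.drop k = cs → k ≤ L.length →
    prev = (if k = 0 then none else L[k - 1]?) →
    (state = 1 ↔ (1 ≤ k ∧ L[k - 1]? = some 'x' ∧ VS L (k - 1))) →
    (state = 2 ↔ (2 ≤ k ∧ L[k - 2]? = some 'x' ∧ L[k - 1]? = some 'y' ∧ VS L (k - 2))) →
    (∀ m, m + 3 ≤ k → ¬ VM L m) →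
    (bLoop cs state prev = true ↔ ∃ m, VM L m) := by
  induction cs with
  | nil =>
    intro k state prev hdrop hk hprev h1 h2 h4
    have hlk : L.length ≤ k := by
      have := congrArg List.length hdrop
      simp [List.length_drop] at this
      omega
    rw [bLoop]
    simp only [Bool.false_eq_true, false_iff]
    rintro ⟨m, hvm⟩
    exact h4 m (by have := VM_lt hvm; omega) hvm
  | cons c rest ih =>
    intro k state prev hdrop hk hprev h1 h2 h4
    have hklt : k < L.length := by
      by_contra hge
      rw [List.drop_eq_nil_of_le (by omega)] at hdrop
      exact List.cons_ne_nil _ _ hdrop.symm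
    have hc : L[k]? = some c := by
      have := List.drop_eq_getElem_cons hklt
      rw [this] at hdrop
      have : L[k] = c := (List.cons.injEq _ _ _ _ ▸ hdrop).1
      rw [List.getElem?_eq_getElem hklt, this]
    have hrest : L.drop (k + 1) = rest := by
      have := List.drop_eq_getElem_cons hklt
      rw [this] at hdrop
      exact (List.cons.injEq _ _ _ _ ▸ hdrop).2
    have hprevVS : (prev ≠ some '.') ↔ VS L k := by
      unfold VS
      by_cases h0 : k = 0
      · subst h0; simp [hprev]
      · rw [hprev, if_neg h0]
        constructor
        · intro h; exact Or.inr h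
        · rintro (h | h)
          · omega
          · exact h
    rw [bLoop]
    by_cases b1 : state = 2 ∧ c = 'z'
    · rw [if_pos b1]
      simp only [true_iff]
      obtain ⟨hk2, hx, hy, hvs⟩ := h2.mp b1.1
      refine ⟨k - 2, hx, ?_, ?_, hvs⟩
      · have : k - 2 + 1 = k - 1 := by omega
        rw [this]; exact hy
      · have : k - 2 + 2 = k := by omega
        rw [this, hc, b1.2]
    · rw [if_neg b1]
      by_cases b2 : state = 1 ∧ c = 'y'
      · rw [if_pos b2]
        apply ih (k + 1) 2 (some c) hrest (by omega)
        · rw [if_neg (by omega)]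
          simp [hc]
        · constructor
          · intro h; omega
          · rintro ⟨_, hx, _⟩
            simp only [Nat.add_sub_cancel] at hx
            rw [hc] at hx
            have : c = 'x' := (Option.some.inj hx)
            rw [this] at b2; exact absurd b2.2 (by decide)
        · obtain ⟨hk1, hx, hvs⟩ := h1.mp b2.1
          constructor
          · intro _
            refine ⟨by omega, ?_, ?_, ?_⟩
            · simpa using hx
            · simp only [Nat.add_sub_cancel]
              rw [hc, b2.2]
            · simpa using hvs
          · intro _; rfl
        · intro m hm
          rcases Nat.lt_or_ge (m + 3) (k + 1) with hlt | hge
          · exact h4 m (by omega)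
          · have hmk : m = k - 2 := by omega
            rintro ⟨_, _, hz, _⟩
            rw [hmk] at hz
            have : k - 2 + 2 = k := by omega
            rw [this, hc] at hz
            have hcz : c = 'z' := (Option.some.inj hz)
            exact absurd (b2.2.symm.trans hcz) (by decide)
      · rw [if_neg b2]
        by_cases b3 : c = 'x' ∧ prev ≠ some '.'
        · rw [if_pos b3]
          apply ih (k + 1) 1 (some c) hrest (by omega)
          · rw [if_neg (by omega)]
            simp [hc]
          · constructor
            · intro _
              refine ⟨by omega, ?_, ?_⟩
              · simp only [Nat.add_sub_cancel]
                rw [hc, b3.1]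
              · simp only [Nat.add_sub_cancel]
                exact hprevVS.mp b3.2
            · intro _; rfl
          · constructor
            · intro h; omega
            · rintro ⟨hk2, hx, hy, _⟩
              simp only [Nat.add_sub_cancel] at hy
              rw [hc] at hy
              have : c = 'y' := (Option.some.inj hy)
              rw [this] at b3; exact absurd b3.1 (by decide)
          · intro m hm
            rcases Nat.lt_or_ge (m + 3) (k + 1) with hlt | hge
            · exact h4 m (by omega)
            · have hmk : m = k - 2 := by omega
              rintro ⟨_, _, hz, _⟩
              rw [hmk] at hz
              have : k - 2 + 2 = k := by omega
              rw [this, hc] at hz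
              have : c = 'z' := (Option.some.inj hz)
              rw [this] at b3; exact absurd b3.1 (by decide)
        · rw [if_neg b3]
          apply ih (k + 1) 0 (some c) hrest (by omega)
          · rw [if_neg (by omega)]
            simp [hc]
          · constructor
            · intro h; exact absurd h (by decide)
            · rintro ⟨_, hx, hvs⟩
              simp only [Nat.add_sub_cancel] at hx hvs
              rw [hc] at hx
              have hcx : c = 'x' := (Option.some.inj hx)
              exact absurd ⟨hcx, hprevVS.mpr hvs⟩ b3
          · constructor
            · intro h; exact absurd h (by decide)
            · rintro ⟨hk2, hx, hy, hvs⟩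
              simp only [Nat.add_sub_cancel] at hy
              rw [hc] at hy
              have hcy : c = 'y' := (Option.some.inj hy)
              have hst1 : state = 1 := by
                apply h1.mpr
                refine ⟨by omega, ?_, ?_⟩
                · have : k + 1 - 2 = k - 1 := by omega
                  rw [this] at hx; exact hx
                · have : k + 1 - 2 = k - 1 := by omega
                  rw [this] at hvs; exact hvs
              exact (b2 ⟨hst1, hcy⟩).elim
          · intro m hm
            rcases Nat.lt_or_ge (m + 3) (k + 1) with hlt | hge
            · exact h4 m (by omega)
            · have hmk : m = k - 2 := by omega
              rintro ⟨hx, hy, hz, hvs⟩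
              rw [hmk] at hx hy hz hvs
              have hz' : k - 2 + 2 = k := by
                have hzlen : k - 2 + 2 < L.length := by
                  have := (List.getElem?_eq_some_iff.mp hz).1
                  omega
                omega
              rw [hz', hc] at hz
              have hcz : c = 'z' := (Option.some.inj hz)
              have hk2 : 2 ≤ k := by
                by_contra hlt2
                -- then m = k - 2 = 0 and m + 2 = k forces k = 2
                omega
              have hst2 : state = 2 := h2.mpr ⟨hk2, hx, by
                have : k - 2 + 1 = k - 1 := by omega
                rw [this] at hy; exact hy, hvs⟩
              exact (b1 ⟨hst2, hcz⟩).elim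

-- B returns true iff some valid match exists
lemma B_iff (s : String) : isXYZ_alt s = true ↔ ∃ m, VM s.toList m := by
  unfold isXYZ_alt
  apply bLoop_iff s.toList s.toList 0 0 none rfl (Nat.zero_le _)
  · simp
  · constructor
    · intro h; exact absurd h (by decide)
    · rintro ⟨h, _⟩; omega
  · constructor
    · intro h; exact absurd h (by decide)
    · rintro ⟨h, _⟩; omega
  · intro m hm; omega

-- ===== VERDICT (by name: the statement is the Claim_ definition above) =====
theorem isXYZ_spec : Claim_equal_isXYZ := by
  intro s _
  unfold Spec_isXYZ
  have hA := A_iff s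
  have hB := B_iff s
  cases hA' : isXYZ s
  · cases hB' : isXYZ_alt s
    · rfl
    · rw [hA'] at hA; rw [hB'] at hB
      exact absurd (hA.mpr (hB.mp rfl)) (by simp)
  · cases hB' : isXYZ_alt s
    · rw [hA'] at hA; rw [hB'] at hB
      exact absurd (hB.mpr (hA.mp rfl)) (by simp)
    · rfl
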